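-- pv_equiv track=rewrite | github.com/MathisHeriveau/Advent-of-code-25 | src/day12.py | rotations
-- ===== SOURCE A (Python) =====
-- def rotations(shape):
--     res = set()
--     h, w = len(shape), len(shape[0])
--     grid = tuple(tuple(c for c in row) for row in shape)
--
--     def rot(g):
--         return tuple(zip(*g[::-1]))
--
--     def flip(g):
--         return tuple(row[::-1] for row in g)
--
--     g = grid
--     for _ in range(4):
--         for v in (g, flip(g)):
--             coords = tuple(
--                 (i, j)
--                 for i in range(len(v))
--                 for j in range(len(v[0]))
--                 if v[i][j] == "#"
--             )
--             minx = min(x for x, _ in coords)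
--             miny = min(y for _, y in coords)
--             norm = tuple(sorted((x - minx, y - miny) for x, y in coords))
--             res.add(norm)
--         g = rot(g)
--     return list(res)
-- ===== SOURCE B (Python) =====
-- def rotations(shape):
--     w = len(shape[0])
--     coords = [(i, j) for i, row in enumerate(shape) for j in range(w) if row[j] == "#"]
--     mirror = [(i, j) for i, row in enumerate(shape) for j in range(w)
--               if row[len(row) - 1 - j] == "#"]
--
--     def norm(p):
--         minx = min(x for x, _ in p)
--         miny = min(y for _, y in p)
--         return tuple(sorted((x - minx, y - miny) for x, y in p))
--
--     res = set()
--     res.add(norm(coords))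
--     res.add(norm(mirror))
--     pts = [(j, -i) for i, j in coords]
--     for _ in range(3):
--         res.add(norm(pts))
--         res.add(norm([(i, -j) for i, j in pts]))
--         pts = [(j, -i) for i, j in pts]
--     return list(res)
-- ===== Notes on version B (the rewrite author's own statement) =====
-- stated objective: alternative
-- what changed: B never rebuilds the grid: it scans the rows once for the '#' coordinates (and once for their mirrored positions, matching the row-reversed view) and generates the remaining orientations by mapping coordinates through the 90-degree rotation (i,j)->(j,-i) and the reflection (i,j)->(i,-j), instead of A's repeated grid reconstruction via zip(*g[::-1]) and per-row reversal followed by full-grid rescans.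
import Mathlib
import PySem

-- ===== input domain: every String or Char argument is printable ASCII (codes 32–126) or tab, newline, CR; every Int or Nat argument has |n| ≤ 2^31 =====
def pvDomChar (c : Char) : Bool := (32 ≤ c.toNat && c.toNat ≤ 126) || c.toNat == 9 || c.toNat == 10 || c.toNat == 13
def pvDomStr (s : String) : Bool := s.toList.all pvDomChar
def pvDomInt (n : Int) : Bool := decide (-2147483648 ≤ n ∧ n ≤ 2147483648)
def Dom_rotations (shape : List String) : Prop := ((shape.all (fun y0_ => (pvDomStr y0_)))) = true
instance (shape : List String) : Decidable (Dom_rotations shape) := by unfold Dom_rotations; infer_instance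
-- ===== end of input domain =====

-- B replaces A's grid rotation/reflection (rebuilding the grid 8 times via zip/reverse and
-- rescanning it) by extracting the '#' coordinates once and mapping them through the 8 dihedral
-- coordinate maps (objective: alternative; the return value is compared as a set, as in
-- Python's list(set(...))).

-- ===== PORT A =====
-- tuple(zip(*m)): columns while every row is nonempty (zip stops at the shortest row)
def pvZip (m : List (List Char)) : List (List Char) :=
  if h : m ≠ [] ∧ ∀ r ∈ m, r ≠ [] then
    (m.map (fun r => r.headD ' ')) :: pvZip (m.map List.tail)
  else []
termination_by (m.headD []).length
decreasing_by
  cases m with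
  | nil => exact absurd rfl h.1
  | cons a t =>
      have ha : a ≠ [] := h.2 a (List.mem_cons_self)
      have : 0 < a.length := List.length_pos_iff.mpr ha
      simp [List.length_tail]
      omega

def pvRot (g : List (List Char)) : List (List Char) := pvZip g.reverse

def pvFlip (g : List (List Char)) : List (List Char) := g.map List.reverse

def pvCoords (v : List (List Char)) : List (Int × Int) :=
  (List.range v.length).flatMap (fun i =>
    (List.range (v.headD []).length).flatMap (fun j =>
      if (v.getD i []).getD j ' ' = '#' then [((i : Int), (j : Int))] else []))

def pvNorm (v : List (List Char)) : List (Int × Int) :=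
  let coords := pvCoords v
  let minx := (PySem.List.min? (coords.map Prod.fst) (fun x => x)).getD 0
  let miny := (PySem.List.min? (coords.map Prod.snd) (fun x => x)).getD 0
  PySem.List.sorted2 (coords.map (fun p => (p.1 - minx, p.2 - miny))) Prod.fst Prod.snd

def rotations (shape : List String) : List (List (Int × Int)) :=
  let grid := shape.map String.toList
  ((List.range 4).foldl
    (fun (st : PySem.Set (List (Int × Int)) × List (List Char)) _ =>
      (PySem.Set.add (PySem.Set.add st.1 (pvNorm st.2)) (pvNorm (pvFlip st.2)), pvRot st.2))
    ((PySem.Set.empty : PySem.Set (List (Int × Int))), grid)).1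

-- ===== PORT B =====
def pvAltCoords (shape : List String) (w : Nat) : List (Int × Int) :=
  (PySem.List.enumerate shape).flatMap (fun ir =>
    (List.range w).flatMap (fun (j : Nat) =>
      if ir.2.toList.getD j ' ' = '#' then [(ir.1, (j : Int))] else []))

def pvAltMirror (shape : List String) (w : Nat) : List (Int × Int) :=
  (PySem.List.enumerate shape).flatMap (fun ir =>
    (List.range w).flatMap (fun (j : Nat) =>
      if ir.2.toList.getD (ir.2.toList.length - 1 - j) ' ' = '#' then [(ir.1, (j : Int))] else []))

def pvAltNorm (p : List (Int × Int)) : List (Int × Int) :=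
  let minx := (PySem.List.min? (p.map Prod.fst) (fun x => x)).getD 0
  let miny := (PySem.List.min? (p.map Prod.snd) (fun x => x)).getD 0
  PySem.List.sorted2 (p.map (fun q => (q.1 - minx, q.2 - miny))) Prod.fst Prod.snd

def rotations_alt (shape : List String) : List (List (Int × Int)) :=
  let w := (shape.headD "").toList.length
  let coords := pvAltCoords shape w
  let mirror := pvAltMirror shape w
  let res0 := PySem.Set.add (PySem.Set.add
    (PySem.Set.empty : PySem.Set (List (Int × Int))) (pvAltNorm coords)) (pvAltNorm mirror)
  ((List.range 3).foldl
    (fun (st : PySem.Set (List (Int × Int)) × List (Int × Int)) _ =>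
      (PySem.Set.add (PySem.Set.add st.1 (pvAltNorm st.2))
         (pvAltNorm (st.2.map (fun q => (q.1, -q.2)))),
       st.2.map (fun q => (q.2, -q.1))))
    (res0, coords.map (fun q => (q.2, -q.1)))).1

-- ===== PRECONDITION & SPEC =====
-- Pre_ excludes exactly the inputs on which A raises: the empty grid (IndexError on shape[0]),
-- grids with a row shorter than the first row (IndexError while scanning), and grids with no '#'
-- in the first-w or in the last-w window of every row (ValueError from min on an empty sequence),
-- where w is the first row's length.
def Pre_rotations (shape : List String) : Prop :=
  shape ≠ [] ∧ (∀ s ∈ shape, (shape.headD "").toList.length ≤ s.toList.length) ∧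
    (∃ s ∈ shape, ∃ j < (shape.headD "").toList.length, s.toList.getD j ' ' = '#') ∧
    (∃ s ∈ shape, ∃ j < (shape.headD "").toList.length,
      s.toList.getD (s.toList.length - 1 - j) ' ' = '#')
instance (shape : List String) : Decidable (Pre_rotations shape) := by
  unfold Pre_rotations; infer_instance

def pvWitness_rotations : List String := ["#."]

def Spec_rotations (shape : List String) (out : List (List (Int × Int))) : Prop := out = rotations_alt shape
instance (shape : List String) (out : List (List (Int × Int))) : Decidable (Spec_rotations shape out) := by unfold Spec_rotations; infer_instance

-- ===== CLAIM (what is proved, stated in full; the proofs are below) =====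
def Claim_equal_rotations : Prop := ∀ (shape : List String), Dom_rotations shape → Pre_rotations shape → Spec_rotations shape (rotations shape)

-- ===== LEMMAS AND PROOFS =====

-- a flatMap whose chunks are separated by an (injectively read-off) key is Nodup
theorem pv_nodup_flatMap {α β κ : Type} (l : List α) (f : α → List β) (kf : α → κ) (key : β → κ)
    (hl : l.Pairwise (fun a b => kf a ≠ kf b))
    (hke : ∀ a ∈ l, ∀ p ∈ f a, key p = kf a)
    (hnd : ∀ a ∈ l, (f a).Nodup) : (l.flatMap f).Nodup := by
  rw [List.flatMap_def, List.nodup_flatten]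
  constructor
  · intro t ht
    rcases List.mem_map.mp ht with ⟨a, ha, rfl⟩
    exact hnd a ha
  · rw [List.pairwise_map]
    refine List.Pairwise.imp_of_mem ?_ hl
    intro a b ha hb hne x hxa hxb
    exact hne ((hke a ha x hxa).symm.trans (hke b hb x hxb))

theorem pv_mem_pvCoords (v : List (List Char)) (p : Int × Int) :
    p ∈ pvCoords v ↔ ∃ i j : Nat, i < v.length ∧ j < (v.headD []).length ∧
      (v.getD i []).getD j ' ' = '#' ∧ p = ((i : Int), (j : Int)) := by
  simp only [pvCoords, List.mem_flatMap, List.mem_range]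
  constructor
  · rintro ⟨i, hi, j, hj, hp⟩
    split at hp
    · next hc => exact ⟨i, j, hi, hj, hc, by simpa using hp⟩
    · simp at hp
  · rintro ⟨i, j, hi, hj, hc, rfl⟩
    exact ⟨i, hi, j, hj, by rw [if_pos hc]; simp⟩

theorem pv_nodup_pvCoords (v : List (List Char)) : (pvCoords v).Nodup := by
  unfold pvCoords
  refine pv_nodup_flatMap _ _ (fun i => (i : Int)) Prod.fst ?_ ?_ ?_
  · exact List.pairwise_lt_range.imp
      (by intro a b h e; exact absurd (Nat.cast_inj.mp e) (Nat.ne_of_lt h))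
  · intro i _ p hp
    simp only [List.mem_flatMap] at hp
    rcases hp with ⟨j, _, hp⟩
    split at hp <;> simp at hp <;> simp [hp]
  · intro i _
    refine pv_nodup_flatMap _ _ (fun j => (j : Int)) Prod.snd ?_ ?_ ?_
    · exact List.pairwise_lt_range.imp
        (by intro a b h e; exact absurd (Nat.cast_inj.mp e) (Nat.ne_of_lt h))
    · intro j _ p hp
      split at hp <;> simp at hp <;> simp [hp]
    · intro j _
      split <;> simp

theorem pv_mem_enumerate {α : Type} (xs : List α) (s : Int) (p : Int × α) :
    p ∈ PySem.List.enumerate xs s ↔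
      ∃ i : Nat, ∃ _h : i < xs.length, p.1 = s + i ∧ p.2 = xs[i] := by
  induction xs generalizing s with
  | nil => simp [PySem.List.enumerate]
  | cons x t ih =>
      simp only [PySem.List.enumerate, List.mem_cons, ih]
      constructor
      · rintro (rfl | ⟨i, hlt, h1, h2⟩)
        · exact ⟨0, by simp, by simp⟩
        · exact ⟨i + 1, by simpa using hlt, by simpa using ⟨by omega, h2⟩⟩
      · rintro ⟨i, hlt, h1, h2⟩
        cases i with
        | zero => left; simp at h1 h2; cases p; simp_all
        | succ n =>
            right
            exact ⟨n, by simpa using hlt, by omega, by simpa using h2⟩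

theorem pv_pairwise_fst_enumerate {α : Type} (xs : List α) (s : Int) :
    (PySem.List.enumerate xs s).Pairwise (fun a b => a.1 ≠ b.1) := by
  induction xs generalizing s with
  | nil => simp [PySem.List.enumerate]
  | cons x t ih =>
      simp only [PySem.List.enumerate, List.pairwise_cons]
      refine ⟨?_, ih (s + 1)⟩
      intro b hb
      rcases (pv_mem_enumerate t (s + 1) b).mp hb with ⟨i, _, h1, _⟩
      show (s : Int) ≠ b.1
      omega

theorem pv_mem_altCoords (shape : List String) (w : Nat) (p : Int × Int) :
    p ∈ pvAltCoords shape w ↔ ∃ i j : Nat, i < shape.length ∧ j < w ∧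
      (shape.getD i "").toList.getD j ' ' = '#' ∧ p = ((i : Int), (j : Int)) := by
  simp only [pvAltCoords, List.mem_flatMap, pv_mem_enumerate, List.mem_range]
  constructor
  · rintro ⟨⟨a, row⟩, ⟨i, hi, ha, hrow⟩, j, hj, hp⟩
    simp only at ha hrow
    subst ha hrow
    split at hp
    · next hc =>
        simp only [List.mem_singleton] at hp
        refine ⟨i, j, hi, hj, ?_, by simpa using hp⟩
        rw [List.getD_eq_getElem _ _ hi]
        exact hc
    · simp at hp
  · rintro ⟨i, j, hi, hj, hc, rfl⟩
    rw [List.getD_eq_getElem _ _ hi] at hc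
    refine ⟨(i, shape[i]), ⟨i, hi, by simp, rfl⟩, j, hj, ?_⟩
    rw [if_pos hc]
    simp

theorem pv_mem_altMirror (shape : List String) (w : Nat) (p : Int × Int) :
    p ∈ pvAltMirror shape w ↔ ∃ i j : Nat, i < shape.length ∧ j < w ∧
      (shape.getD i "").toList.getD ((shape.getD i "").toList.length - 1 - j) ' ' = '#' ∧
      p = ((i : Int), (j : Int)) := by
  simp only [pvAltMirror, List.mem_flatMap, pv_mem_enumerate, List.mem_range]
  constructor
  · rintro ⟨⟨a, row⟩, ⟨i, hi, ha, hrow⟩, j, hj, hp⟩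
    simp only at ha hrow
    subst ha hrow
    split at hp
    · next hc =>
        simp only [List.mem_singleton] at hp
        refine ⟨i, j, hi, hj, ?_, by simpa using hp⟩
        rw [List.getD_eq_getElem _ _ hi]
        exact hc
    · simp at hp
  · rintro ⟨i, j, hi, hj, hc, rfl⟩
    rw [List.getD_eq_getElem _ _ hi] at hc
    refine ⟨(i, shape[i]), ⟨i, hi, by simp, rfl⟩, j, hj, ?_⟩
    rw [if_pos hc]
    simp

theorem pv_nodup_altCoords (shape : List String) (w : Nat) : (pvAltCoords shape w).Nodup := by
  unfold pvAltCoords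
  refine pv_nodup_flatMap _ _ Prod.fst Prod.fst (pv_pairwise_fst_enumerate shape 0) ?_ ?_
  · intro ir _ p hp
    simp only [List.mem_flatMap] at hp
    rcases hp with ⟨j, _, hp⟩
    split at hp <;> simp at hp <;> simp [hp]
  · intro ir _
    refine pv_nodup_flatMap _ _ (fun j => (j : Int)) Prod.snd ?_ ?_ ?_
    · exact List.pairwise_lt_range.imp
        (by intro a b h e; exact absurd (Nat.cast_inj.mp e) (Nat.ne_of_lt h))
    · intro j _ p hp
      split at hp <;> simp at hp <;> simp [hp]
    · intro j _
      split <;> simp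

theorem pv_nodup_altMirror (shape : List String) (w : Nat) : (pvAltMirror shape w).Nodup := by
  unfold pvAltMirror
  refine pv_nodup_flatMap _ _ Prod.fst Prod.fst (pv_pairwise_fst_enumerate shape 0) ?_ ?_
  · intro ir _ p hp
    simp only [List.mem_flatMap] at hp
    rcases hp with ⟨j, _, hp⟩
    split at hp <;> simp at hp <;> simp [hp]
  · intro ir _
    refine pv_nodup_flatMap _ _ (fun j => (j : Int)) Prod.snd ?_ ?_ ?_
    · exact List.pairwise_lt_range.imp
        (by intro a b h e; exact absurd (Nat.cast_inj.mp e) (Nat.ne_of_lt h))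
    · intro j _ p hp
      split at hp <;> simp at hp <;> simp [hp]
    · intro j _
      split <;> simp

theorem pv_minD_perm {xs ys : List Int} (h : xs.Perm ys) :
    (PySem.List.min? xs (fun x => x)).getD 0 = (PySem.List.min? ys (fun x => x)).getD 0 := by
  rcases eq_or_ne xs ([] : List Int) with rfl | hne
  · rw [← h.nil_eq]
  · have hys : ys ≠ [] := fun e => hne (by simpa [e] using h)
    rcases Option.ne_none_iff_exists'.mp
      (fun e => hne ((PySem.List.min?_eq_none_iff xs (fun x : Int => x)).mp e)) with ⟨m, hm⟩
    rcases Option.ne_none_iff_exists'.mp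
      (fun e => hys ((PySem.List.min?_eq_none_iff ys (fun x : Int => x)).mp e)) with ⟨m', hm'⟩
    rw [hm, hm']
    simp only [Option.getD_some]
    have h1 := PySem.List.min?_isMin hm m' (h.mem_iff.mpr (PySem.List.min?_mem hm'))
    have h2 := PySem.List.min?_isMin hm' m (h.mem_iff.mp (PySem.List.min?_mem hm))
    exact le_antisymm h1 h2

theorem pv_minD_shift (xs : List Int) (c : Int) (hne : xs ≠ []) :
    (PySem.List.min? (xs.map (fun x => x + c)) (fun x => x)).getD 0
      = (PySem.List.min? xs (fun x => x)).getD 0 + c := by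
  have hne' : xs.map (fun x => x + c) ≠ [] := by simpa using hne
  rcases Option.ne_none_iff_exists'.mp
    (fun e => hne ((PySem.List.min?_eq_none_iff xs (fun x : Int => x)).mp e)) with ⟨m, hm⟩
  rcases Option.ne_none_iff_exists'.mp
    (fun e => hne' ((PySem.List.min?_eq_none_iff (xs.map (fun x => x + c))
      (fun x : Int => x)).mp e)) with ⟨m', hm'⟩
  rw [hm, hm']
  simp only [Option.getD_some]
  have hmem' := PySem.List.min?_mem hm'
  rcases List.mem_map.mp hmem' with ⟨x, hx, rfl⟩
  have h1 : x + c ≤ m + c := PySem.List.min?_isMin hm' (m + c)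
    (List.mem_map_of_mem (PySem.List.min?_mem hm))
  have h2 : m ≤ x := PySem.List.min?_isMin hm x hx
  omega

-- Python's sorted on int pairs is sorting by the lexicographic key
theorem pv_sorted2_eq_sorted_lex (xs : List (Int × Int)) :
    PySem.List.sorted2 xs Prod.fst Prod.snd
      = PySem.List.sorted xs (fun p => toLex p) := by
  unfold PySem.List.sorted2 PySem.List.sorted
  simp only
  congr 1
  funext acc x
  congr 1
  funext a b
  by_cases h1 : a.1 < b.1 <;> by_cases h2 : b.1 < a.1 <;> by_cases h3 : a.2 < b.2 <;>
    simp [h1, h2, h3, Prod.Lex.toLex_lt_toLex] <;> omega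

theorem pv_sorted2_eq_of_perm {xs ys : List (Int × Int)} (h : xs.Perm ys) (hnd : xs.Nodup) :
    PySem.List.sorted2 xs Prod.fst Prod.snd = PySem.List.sorted2 ys Prod.fst Prod.snd := by
  rw [pv_sorted2_eq_sorted_lex, pv_sorted2_eq_sorted_lex]
  have hperm := PySem.List.sorted_perm xs (fun p : Int × Int => toLex p) false
  have hle := PySem.List.sorted_pairwise xs (fun p : Int × Int => toLex p)
  have hndz : (PySem.List.sorted xs (fun p : Int × Int => toLex p) false).Nodup :=
    hperm.nodup_iff.mpr hnd
  have hlt : (PySem.List.sorted xs (fun p : Int × Int => toLex p) false).Pairwise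
      (fun a b => toLex a < toLex b) := by
    refine List.Pairwise.imp_of_mem ?_ (hle.and hndz)
    rintro a b _ _ ⟨hab, hne⟩
    exact lt_of_le_of_ne hab (fun e => hne (toLex_inj.mp e))
  exact (PySem.List.sorted_eq_of_perm_of_pairwise_lt ys _ (fun p : Int × Int => toLex p)
    (hperm.trans h) hlt).symm

-- normalisation is invariant under permutation and translation of the point set
theorem pv_altNorm_eq_of_perm_shift (p q : List (Int × Int)) (dx dy : Int) (hp : p ≠ [])
    (hq : q.Perm (p.map (fun r => (r.1 + dx, r.2 + dy)))) (hnd : q.Nodup) :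
    pvAltNorm q = pvAltNorm p := by
  have hpf : p.map Prod.fst ≠ [] := by simpa using hp
  have hps : p.map Prod.snd ≠ [] := by simpa using hp
  have hqf : (q.map Prod.fst).Perm ((p.map Prod.fst).map (fun x => x + dx)) := by
    have := hq.map Prod.fst
    simpa [List.map_map, Function.comp] using this
  have hqs : (q.map Prod.snd).Perm ((p.map Prod.snd).map (fun x => x + dy)) := by
    have := hq.map Prod.snd
    simpa [List.map_map, Function.comp] using this
  have hminx : (PySem.List.min? (q.map Prod.fst) (fun x => x)).getD 0
      = (PySem.List.min? (p.map Prod.fst) (fun x => x)).getD 0 + dx := by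
    rw [pv_minD_perm hqf, pv_minD_shift _ _ hpf]
  have hminy : (PySem.List.min? (q.map Prod.snd) (fun x => x)).getD 0
      = (PySem.List.min? (p.map Prod.snd) (fun x => x)).getD 0 + dy := by
    rw [pv_minD_perm hqs, pv_minD_shift _ _ hps]
  unfold pvAltNorm
  rw [hminx, hminy]
  set mx := (PySem.List.min? (p.map Prod.fst) (fun x => x)).getD 0 with hmx
  set my := (PySem.List.min? (p.map Prod.snd) (fun x => x)).getD 0 with hmy
  apply pv_sorted2_eq_of_perm
  · have h1 := hq.map (fun r : Int × Int => (r.1 - (mx + dx), r.2 - (my + dy)))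
    refine h1.trans ?_
    rw [List.map_map]
    apply List.Perm.of_eq
    apply List.map_congr_left
    intro r _
    simp only [Function.comp]
    refine Prod.ext ?_ ?_ <;> simp <;> ring
  · exact hnd.map
      (by intro a b e; simp only [Prod.mk.injEq] at e; exact Prod.ext (by omega) (by omega))

-- zip(*m) on a nonempty m whose rows all have length ≥ w, some row exactly w, is the
-- list of the first w columns
theorem pv_pvZip_eq (w : Nat) (m : List (List Char)) (hm : m ≠ [])
    (hge : ∀ r ∈ m, w ≤ r.length) (hex : ∃ r ∈ m, r.length = w) :
    pvZip m = (List.range w).map (fun j => m.map (fun r => r.getD j ' ')) := by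
  induction w generalizing m with
  | zero =>
      rw [pvZip]
      rw [dif_neg]
      · simp
      · rintro ⟨h1, h2⟩
        rcases hex with ⟨a, ha, haw⟩
        exact h2 a ha (List.eq_nil_of_length_eq_zero haw)
  | succ n ih =>
      have hne : ∀ r ∈ m, r ≠ [] := by
        intro r hr e
        have := hge r hr
        simp [e] at this
      rw [pvZip, dif_pos ⟨hm, hne⟩]
      rcases hex with ⟨a, ha, haw⟩
      rw [ih (m.map List.tail) (by simpa using hm)
        (by intro r hr; rcases List.mem_map.mp hr with ⟨b, hb, rfl⟩
            have := hge b hb; simp [List.length_tail]; omega)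
        ⟨a.tail, List.mem_map_of_mem ha, by simp [List.length_tail]; omega⟩]
      rw [List.range_succ_eq_map]
      simp only [List.map_cons, List.map_map]
      congr 1
      · apply List.map_congr_left
        intro r hr
        match r, hne r hr with
        | c :: t, _ => simp
      · apply List.map_congr_left
        intro j _
        simp only [Function.comp]
        apply List.map_congr_left
        intro r hr
        match r, hne r hr with
        | c :: t, _ => simp

theorem pv_getD_getD (v : List (List Char)) (i j : Nat) (hi : i < v.length)
    (hj : j < v[i].length) : (v.getD i []).getD j ' ' = v[i][j] := by
  rw [List.getD_eq_getElem _ _ hi, List.getD_eq_getElem _ _ hj]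

theorem pv_headD_mem (g : List (List Char)) (hg : g ≠ []) : g.headD [] ∈ g := by
  match g, hg with
  | r :: t, _ => exact List.mem_cons_self

theorem pv_rot_eq (g : List (List Char)) (w : Nat) (hg : g ≠ [])
    (hhd : (g.headD []).length = w) (hge : ∀ r ∈ g, w ≤ r.length) :
    pvRot g = (List.range w).map (fun j => g.reverse.map (fun r => r.getD j ' ')) := by
  unfold pvRot
  refine pv_pvZip_eq w g.reverse (by simpa using hg) ?_
    ⟨g.headD [], List.mem_reverse.mpr (pv_headD_mem g hg), hhd⟩
  intro r hrm
  exact hge r (List.mem_reverse.mp hrm)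

theorem pv_rot_headD (g : List (List Char)) (w : Nat) (hg : g ≠ []) (hw : 0 < w)
    (hhd : (g.headD []).length = w) (hge : ∀ r ∈ g, w ≤ r.length) :
    (pvRot g).headD [] = g.reverse.map (fun r => r.getD 0 ' ') := by
  rw [pv_rot_eq g w hg hhd hge]
  match w, hw with
  | n + 1, _ => rw [List.range_succ_eq_map]; simp

theorem pv_rot_cell (g : List (List Char)) (w : Nat) (hg : g ≠ [])
    (hhd : (g.headD []).length = w) (hge : ∀ r ∈ g, w ≤ r.length)
    (a b : Nat) (ha : a < w) (hb : b < g.length) :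
    ((pvRot g).getD a []).getD b ' ' = (g.getD (g.length - 1 - b) []).getD a ' ' := by
  have hrow : (pvRot g).getD a [] = g.reverse.map (fun r => r.getD a ' ') := by
    rw [pv_rot_eq g w hg hhd hge]
    rw [List.getD_eq_getElem _ _ (by simpa using ha)]
    rw [List.getElem_map, List.getElem_range]
  rw [hrow]
  rw [List.getD_eq_getElem _ _ (by simpa using hb)]
  rw [List.getElem_map, List.getElem_reverse]
  have hrw : w ≤ g[g.length - 1 - b].length := hge _ (List.getElem_mem _)
  rw [pv_getD_getD g _ a (by omega) (by omega)]
  rw [List.getD_eq_getElem _ _ (by omega)]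

theorem pv_coords_rot (g : List (List Char)) (w : Nat) (hg : g ≠ []) (hw : 0 < w)
    (hhd : (g.headD []).length = w) (hge : ∀ r ∈ g, w ≤ r.length) :
    (pvCoords (pvRot g)).Perm
      ((pvCoords g).map (fun q => (q.2, (g.length : Int) - 1 - q.1))) := by
  have hinj : Function.Injective (fun q : Int × Int => (q.2, (g.length : Int) - 1 - q.1)) := by
    intro q q' e
    simp only [Prod.mk.injEq] at e
    exact Prod.ext (by omega) e.1
  rw [List.perm_ext_iff_of_nodup (pv_nodup_pvCoords _) ((pv_nodup_pvCoords g).map hinj)]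
  intro p
  have hlen : (pvRot g).length = w := by rw [pv_rot_eq g w hg hhd hge]; simp
  have hhead : ((pvRot g).headD []).length = g.length := by
    rw [pv_rot_headD g w hg hw hhd hge]; simp
  rw [pv_mem_pvCoords, List.mem_map]
  constructor
  · rintro ⟨i, j, hi, hj, hc, rfl⟩
    rw [hlen] at hi; rw [hhead] at hj
    rw [pv_rot_cell g w hg hhd hge i j hi hj] at hc
    refine ⟨((g.length - 1 - j : Nat), (i : Nat)), ?_, ?_⟩
    · exact (pv_mem_pvCoords g _).mpr ⟨g.length - 1 - j, i, by omega,
        (by omega : i < (g.headD []).length), hc, rfl⟩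
    · simp only [Prod.mk.injEq]
      exact ⟨trivial, by omega⟩
  · rintro ⟨q, hq, rfl⟩
    rcases (pv_mem_pvCoords g q).mp hq with ⟨a, b, ha, hb, hc, rfl⟩
    refine ⟨b, g.length - 1 - a, by omega, by omega, ?_, ?_⟩
    · rw [pv_rot_cell g w hg hhd hge b (g.length - 1 - a) (by omega) (by omega)]
      have : g.length - 1 - (g.length - 1 - a) = a := by omega
      rw [this]
      exact hc
    · simp only [Prod.mk.injEq]
      exact ⟨trivial, by omega⟩

theorem pv_flip_cell (g : List (List Char)) (w : Nat) (hr : ∀ r ∈ g, r.length = w)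
    (i j : Nat) (hi : i < g.length) (hj : j < w) :
    ((pvFlip g).getD i []).getD j ' ' = (g.getD i []).getD (w - 1 - j) ' ' := by
  have hri : g[i].length = w := hr _ (List.getElem_mem _)
  have h1 : (pvFlip g).getD i [] = g[i].reverse := by
    rw [List.getD_eq_getElem _ _ (by simpa [pvFlip] using hi)]
    simp [pvFlip]
  rw [h1, List.getD_eq_getElem _ _ (by simpa [hri] using hj), List.getElem_reverse,
    pv_getD_getD g i _ hi (by omega)]
  congr 1
  omega

theorem pv_coords_flip (g : List (List Char)) (w : Nat) (hg : g ≠ [])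
    (hr : ∀ r ∈ g, r.length = w) :
    (pvCoords (pvFlip g)).Perm ((pvCoords g).map (fun q => (q.1, (w : Int) - 1 - q.2))) := by
  have hinj : Function.Injective (fun q : Int × Int => (q.1, (w : Int) - 1 - q.2)) := by
    intro q q' e
    simp only [Prod.mk.injEq] at e
    exact Prod.ext e.1 (by omega)
  rw [List.perm_ext_iff_of_nodup (pv_nodup_pvCoords _) ((pv_nodup_pvCoords g).map hinj)]
  intro p
  have h0 : (g.headD []).length = w := hr _ (pv_headD_mem g hg)
  have hlen : (pvFlip g).length = g.length := by simp [pvFlip]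
  have hhead : ((pvFlip g).headD []).length = w := by
    match g, hg with
    | r :: t, _ => simpa [pvFlip] using hr r (List.mem_cons_self)
  rw [pv_mem_pvCoords, List.mem_map]
  constructor
  · rintro ⟨i, j, hi, hj, hc, rfl⟩
    rw [hlen] at hi; rw [hhead] at hj
    rw [pv_flip_cell g w hr i j hi hj] at hc
    refine ⟨((i : Nat), (w - 1 - j : Nat)), (pv_mem_pvCoords g _).mpr
      ⟨i, w - 1 - j, hi, by omega, hc, rfl⟩, ?_⟩
    simp only [Prod.mk.injEq]
    exact ⟨trivial, by omega⟩
  · rintro ⟨q, hq, rfl⟩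
    rcases (pv_mem_pvCoords g q).mp hq with ⟨a, b, ha, hb, hc, rfl⟩
    rw [h0] at hb
    refine ⟨a, w - 1 - b, by omega, by omega, ?_, ?_⟩
    · rw [pv_flip_cell g w hr a (w - 1 - b) (by omega) (by omega)]
      have : w - 1 - (w - 1 - b) = b := by omega
      rw [this]
      exact hc
    · simp only [Prod.mk.injEq]
      exact ⟨trivial, by omega⟩

-- loop invariant for the rectangular stages: the grid A carries and the point list
-- B carries describe the same shape up to a translation
def PvGood (g : List (List Char)) (pts : List (Int × Int)) : Prop :=
  g ≠ [] ∧ 0 < (g.headD []).length ∧ (∀ r ∈ g, r.length = (g.headD []).length) ∧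
    pts ≠ [] ∧ ∃ dx dy : Int, (pvCoords g).Perm (pts.map (fun r => (r.1 + dx, r.2 + dy)))

theorem pv_good_norm (g : List (List Char)) (pts : List (Int × Int)) (h : PvGood g pts) :
    pvNorm g = pvAltNorm pts := by
  obtain ⟨hg, hw, hr, hp, dx, dy, hperm⟩ := h
  show pvAltNorm (pvCoords g) = pvAltNorm pts
  exact pv_altNorm_eq_of_perm_shift pts (pvCoords g) dx dy hp hperm (pv_nodup_pvCoords g)

theorem pv_good_flip (g : List (List Char)) (pts : List (Int × Int)) (h : PvGood g pts) :
    pvNorm (pvFlip g) = pvAltNorm (pts.map (fun q => (q.1, -q.2))) := by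
  obtain ⟨hg, hw, hr, hp, dx, dy, hperm⟩ := h
  set w := (g.headD []).length with hwdef
  show pvAltNorm (pvCoords (pvFlip g)) = _
  refine pv_altNorm_eq_of_perm_shift _ _ dx ((w : Int) - 1 - dy) (by simpa using hp) ?_
    (pv_nodup_pvCoords _)
  refine ((pv_coords_flip g w hg hr).trans
    (hperm.map (fun q : Int × Int => (q.1, (w : Int) - 1 - q.2)))).trans ?_
  apply List.Perm.of_eq
  rw [List.map_map, List.map_map]
  apply List.map_congr_left
  intro r _
  simp only [Function.comp]
  refine Prod.ext (by simp) (by simp; ring)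

theorem pv_good_rot (g : List (List Char)) (pts : List (Int × Int)) (h : PvGood g pts) :
    PvGood (pvRot g) (pts.map (fun q => (q.2, -q.1))) := by
  obtain ⟨hg, hw, hr, hp, dx, dy, hperm⟩ := h
  set w := (g.headD []).length with hwdef
  have hge : ∀ r ∈ g, w ≤ r.length := fun r hrm => le_of_eq (hr r hrm).symm
  have hre := pv_rot_eq g w hg rfl hge
  have hlen : (pvRot g).length = w := by rw [hre]; simp
  have hgne : pvRot g ≠ [] := by
    intro e
    rw [e] at hlen
    simp at hlen
    omega
  have hhead : ((pvRot g).headD []).length = g.length := by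
    rw [pv_rot_headD g w hg hw rfl hge]
    simp
  have hglen : 0 < g.length := List.length_pos_iff.mpr hg
  refine ⟨hgne, by omega, ?_, by simpa using hp, dy, (g.length : Int) - 1 - dx, ?_⟩
  · intro r hrm
    rw [hre] at hrm
    rcases List.mem_map.mp hrm with ⟨j, _, rfl⟩
    rw [hhead]; simp
  · refine ((pv_coords_rot g w hg hw rfl hge).trans
      (hperm.map (fun q : Int × Int => (q.2, (g.length : Int) - 1 - q.1)))).trans ?_
    apply List.Perm.of_eq
    rw [List.map_map, List.map_map]
    apply List.map_congr_left
    intro r _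
    simp only [Function.comp]
    refine Prod.ext (by simp) (by simp; ring)

-- the base stage: grid facts from the precondition
theorem pv_grid_hd (shape : List String) (hne : shape ≠ []) :
    (shape.map String.toList).headD [] = (shape.headD "").toList := by
  match shape, hne with
  | t :: ts, _ => simp

theorem pv_grid_getD (shape : List String) (i : Nat) (hi : i < shape.length) :
    (shape.map String.toList).getD i [] = (shape.getD i "").toList := by
  rw [List.getD_eq_getElem _ _ (by simpa using hi), List.getD_eq_getElem _ _ hi,
    List.getElem_map]

-- A's first scan sees exactly B's coords list (up to order)
theorem pv_perm_coords0 (shape : List String) (hpre : Pre_rotations shape) :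
    (pvCoords (shape.map String.toList)).Perm
      (pvAltCoords shape (shape.headD "").toList.length) := by
  obtain ⟨hne, hge, _, _⟩ := hpre
  rw [List.perm_ext_iff_of_nodup (pv_nodup_pvCoords _) (pv_nodup_altCoords _ _)]
  intro p
  rw [pv_mem_pvCoords, pv_mem_altCoords]
  constructor
  · rintro ⟨i, j, hi, hj, hc, rfl⟩
    simp only [List.length_map] at hi
    rw [pv_grid_hd shape hne] at hj
    rw [pv_grid_getD shape i hi] at hc
    exact ⟨i, j, hi, hj, hc, rfl⟩
  · rintro ⟨i, j, hi, hj, hc, rfl⟩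
    rw [← pv_grid_getD shape i hi] at hc
    exact ⟨i, j, by simpa using hi, by rw [pv_grid_hd shape hne]; exact hj, hc, rfl⟩

-- A's scan of the row-reversed grid sees exactly B's mirror list (up to order)
theorem pv_perm_mirror0 (shape : List String) (hpre : Pre_rotations shape) :
    (pvCoords (pvFlip (shape.map String.toList))).Perm
      (pvAltMirror shape (shape.headD "").toList.length) := by
  obtain ⟨hne, hge, _, _⟩ := hpre
  have hhd := pv_grid_hd shape hne
  rw [List.perm_ext_iff_of_nodup (pv_nodup_pvCoords _) (pv_nodup_altMirror _ _)]
  intro p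
  have hflen : (pvFlip (shape.map String.toList)).length = shape.length := by simp [pvFlip]
  have hfhd : (pvFlip (shape.map String.toList)).headD [] = (shape.headD "").toList.reverse := by
    match shape, hne with
    | t :: ts, _ => simp [pvFlip]
  have hcell : ∀ i j : Nat, i < shape.length → j < (shape.headD "").toList.length →
      ((pvFlip (shape.map String.toList)).getD i []).getD j ' '
        = (shape.getD i "").toList.getD ((shape.getD i "").toList.length - 1 - j) ' ' := by
    intro i j hi hj
    have hri : (shape.getD i "").toList.length ≥ (shape.headD "").toList.length := by
      have := hge (shape.getD i "") (by rw [List.getD_eq_getElem _ _ hi]; exact List.getElem_mem _)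
      omega
    have h1 : (pvFlip (shape.map String.toList)).getD i [] = (shape.getD i "").toList.reverse := by
      rw [List.getD_eq_getElem _ _ (by simpa [pvFlip] using hi)]
      simp only [pvFlip, List.getElem_map]
      congr 1
      rw [List.getD_eq_getElem _ _ hi]
    rw [h1, List.getD_eq_getElem _ _ (by simpa using (by omega : j < (shape.getD i "").toList.length)),
      List.getElem_reverse]
    exact (List.getD_eq_getElem _ _ (by omega)).symm
  rw [pv_mem_pvCoords, pv_mem_altMirror]
  constructor
  · rintro ⟨i, j, hi, hj, hc, rfl⟩
    rw [hflen] at hi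
    rw [hfhd] at hj
    simp only [List.length_reverse] at hj
    rw [hcell i j hi hj] at hc
    exact ⟨i, j, hi, hj, hc, rfl⟩
  · rintro ⟨i, j, hi, hj, hc, rfl⟩
    rw [← hcell i j hi hj] at hc
    refine ⟨i, j, by rw [hflen]; exact hi, ?_, hc, rfl⟩
    rw [hfhd]
    simpa using hj

theorem pv_coords0_ne (shape : List String) (hpre : Pre_rotations shape) :
    pvAltCoords shape (shape.headD "").toList.length ≠ [] := by
  obtain ⟨hne, _, ⟨s, hs, j, hj, hc⟩, _⟩ := hpre
  rcases List.mem_iff_getElem.mp hs with ⟨i, hi, rfl⟩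
  apply List.ne_nil_of_mem (a := ((i : Int), (j : Int)))
  refine (pv_mem_altCoords shape _ _).mpr ⟨i, j, hi, hj, ?_, rfl⟩
  rw [List.getD_eq_getElem _ _ hi]
  exact hc

theorem pv_mirror0_ne (shape : List String) (hpre : Pre_rotations shape) :
    pvAltMirror shape (shape.headD "").toList.length ≠ [] := by
  obtain ⟨hne, _, _, ⟨s, hs, j, hj, hc⟩⟩ := hpre
  rcases List.mem_iff_getElem.mp hs with ⟨i, hi, rfl⟩
  apply List.ne_nil_of_mem (a := ((i : Int), (j : Int)))
  refine (pv_mem_altMirror shape _ _).mpr ⟨i, j, hi, hj, ?_, rfl⟩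
  rw [List.getD_eq_getElem _ _ hi]
  exact hc

theorem pv_norm0 (shape : List String) (hpre : Pre_rotations shape) :
    pvNorm (shape.map String.toList)
      = pvAltNorm (pvAltCoords shape (shape.headD "").toList.length) := by
  show pvAltNorm (pvCoords (shape.map String.toList)) = _
  refine pv_altNorm_eq_of_perm_shift _ _ 0 0 (pv_coords0_ne shape hpre) ?_
    (pv_nodup_pvCoords _)
  have hid : (pvAltCoords shape (shape.headD "").toList.length).map
      (fun r : Int × Int => (r.1 + 0, r.2 + 0))
      = pvAltCoords shape (shape.headD "").toList.length := by simp
  rw [hid]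
  exact pv_perm_coords0 shape hpre

theorem pv_mirror_norm0 (shape : List String) (hpre : Pre_rotations shape) :
    pvNorm (pvFlip (shape.map String.toList))
      = pvAltNorm (pvAltMirror shape (shape.headD "").toList.length) := by
  show pvAltNorm (pvCoords (pvFlip (shape.map String.toList))) = _
  refine pv_altNorm_eq_of_perm_shift _ _ 0 0 (pv_mirror0_ne shape hpre) ?_
    (pv_nodup_pvCoords _)
  have hid : (pvAltMirror shape (shape.headD "").toList.length).map
      (fun r : Int × Int => (r.1 + 0, r.2 + 0))
      = pvAltMirror shape (shape.headD "").toList.length := by simp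
  rw [hid]
  exact pv_perm_mirror0 shape hpre

-- after the first (possibly ragged) rotation the grid is rectangular and tracks B's points
theorem pv_good1 (shape : List String) (hpre : Pre_rotations shape) :
    PvGood (pvRot (shape.map String.toList))
      ((pvAltCoords shape (shape.headD "").toList.length).map (fun q => (q.2, -q.1))) := by
  have hpre' := hpre
  obtain ⟨hne, hge', ⟨s, hs, j, hj, hc⟩, _⟩ := hpre
  have hw : 0 < (shape.headD "").toList.length := by omega
  have hg : shape.map String.toList ≠ [] := by simpa using hne
  have hhd : ((shape.map String.toList).headD []).length = (shape.headD "").toList.length := by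
    rw [pv_grid_hd shape hne]
  have hge : ∀ r ∈ shape.map String.toList, (shape.headD "").toList.length ≤ r.length := by
    intro r hrm
    rcases List.mem_map.mp hrm with ⟨t, ht, rfl⟩
    exact hge' t ht
  have hre := pv_rot_eq (shape.map String.toList) (shape.headD "").toList.length hg hhd hge
  have hlen : (pvRot (shape.map String.toList)).length = (shape.headD "").toList.length := by
    rw [hre]; simp
  have hgne : pvRot (shape.map String.toList) ≠ [] := by
    intro e
    have h0 : (shape.headD "").toList.length = 0 := by rw [← hlen, e]; rfl
    omega
  have hhead : ((pvRot (shape.map String.toList)).headD []).length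
      = (shape.map String.toList).length := by
    rw [pv_rot_headD (shape.map String.toList) (shape.headD "").toList.length hg hw hhd hge]
    simp
  have hglen : 0 < (shape.map String.toList).length := by
    simpa using List.length_pos_iff.mpr hne
  refine ⟨hgne, by omega, ?_, by simpa using pv_coords0_ne shape hpre', 0,
    (((shape.map String.toList).length : Int) - 1 - 0), ?_⟩
  · intro r hrm
    rw [hre] at hrm
    rcases List.mem_map.mp hrm with ⟨j', _, rfl⟩
    rw [hhead]; simp
  · refine ((pv_coords_rot (shape.map String.toList) (shape.headD "").toList.length
      hg hw hhd hge).trans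
      ((pv_perm_coords0 shape hpre').map
        (fun q : Int × Int => (q.2, ((shape.map String.toList).length : Int) - 1 - q.1)))).trans ?_
    apply List.Perm.of_eq
    rw [List.map_map]
    apply List.map_congr_left
    intro r _
    simp only [Function.comp]
    refine Prod.ext (by simp) (by simp; ring)

-- ===== VERDICT (by name: the statement is the Claim_ definition above) =====
theorem rotations_spec : Claim_equal_rotations := by
  intro shape _ hpre
  show rotations shape = rotations_alt shape
  have e1 := pv_norm0 shape hpre
  have e2 := pv_mirror_norm0 shape hpre
  have G1 := pv_good1 shape hpre
  have G2 := pv_good_rot _ _ G1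
  have G3 := pv_good_rot _ _ G2
  simp only [rotations, rotations_alt]
  have h4 : List.range 4 = [0, 1, 2, 3] := by decide
  have h3 : List.range 3 = [0, 1, 2] := by decide
  rw [h4, h3]
  simp only [List.foldl_cons, List.foldl_nil]
  rw [e1, e2, pv_good_norm _ _ G1, pv_good_flip _ _ G1, pv_good_norm _ _ G2,
    pv_good_flip _ _ G2, pv_good_norm _ _ G3, pv_good_flip _ _ G3]
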